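-- pv_equiv track=rewrite | github.com/WasinUddy/ImageCaptionGenerator | model/DL.py | load_description_dataset
-- ===== SOURCE A (Python) =====
-- def load_description_dataset(description_mapping: dict, image_paths: list):
--     dataset = dict()
--
--     for image_id, descs in description_mapping.items():
--
--         expected_path = image_id + '.jpg'
--
--         # Check if image in list of image of interest to built dataset
--         if expected_path in image_paths:
--
--             # If image id is not present in the dataset, add it
--             if image_id not in dataset:
--                 dataset[image_id] = list()
--
--             # Add description to the dataset
--             for desc in descs:
--                 dataset[image_id].append('<start> ' + desc + ' <end>')
--
--     return dataset
-- ===== SOURCE B (Python) =====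
-- def load_description_dataset(description_mapping: dict, image_paths: list):
--     # Scan image_paths (not the mapping): record the mapping position of each matched
--     # .jpg stem once, sort by position to restore the mapping's order, then wrap.
--     pos = {image_id: i for i, image_id in enumerate(description_mapping)}
--     matched = []
--     seen = set()
--     for path in image_paths:
--         if path.endswith('.jpg'):
--             image_id = path[:-4]
--             i = pos.get(image_id)
--             if i is not None and image_id not in seen:
--                 seen.add(image_id)
--                 matched.append((i, image_id))
--     matched.sort(key=lambda t: t[0])
--     return {image_id: ['<start> ' + desc + ' <end>' for desc in description_mapping[image_id]]
--             for _, image_id in matched}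
-- ===== Notes on version B (the rewrite author's own statement) =====
-- stated objective: alternative
-- what changed: B inverts the traversal: instead of scanning image_paths once per mapping key while growing a mutable dict, it indexes the mapping keys by position, makes a single pass over image_paths collecting the (position, id) of each matched .jpg stem with a seen-set, sorts by position to restore the mapping's order, and emits the wrapped descriptions by lookup.
import Mathlib
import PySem

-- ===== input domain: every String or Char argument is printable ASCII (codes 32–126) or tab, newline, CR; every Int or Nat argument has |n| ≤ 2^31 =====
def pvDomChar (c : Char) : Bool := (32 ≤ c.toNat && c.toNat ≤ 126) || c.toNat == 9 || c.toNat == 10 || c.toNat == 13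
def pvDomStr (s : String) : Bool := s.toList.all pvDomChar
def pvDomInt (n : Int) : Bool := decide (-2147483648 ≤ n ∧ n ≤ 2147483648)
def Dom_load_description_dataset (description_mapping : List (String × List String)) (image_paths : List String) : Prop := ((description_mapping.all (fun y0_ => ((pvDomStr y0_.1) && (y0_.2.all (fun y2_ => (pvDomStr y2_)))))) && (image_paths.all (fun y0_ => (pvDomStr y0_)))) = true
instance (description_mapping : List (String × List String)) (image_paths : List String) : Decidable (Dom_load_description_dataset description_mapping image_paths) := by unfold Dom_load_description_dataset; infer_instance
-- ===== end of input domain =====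

-- B inverts the traversal: it indexes the mapping keys by position, scans image_paths once
-- collecting the (position, id) of each matched '.jpg' stem, sorts by position to restore the
-- mapping's order, and emits the wrapped descriptions by lookup (objective: alternative/faster).

-- ===== PORT A =====
def load_description_dataset (description_mapping : List (String × List String)) (image_paths : List String) : List (String × List String) :=
  (description_mapping.foldl
    (fun (dataset : PySem.Dict String (List String)) p =>
      let expected_path := p.1 ++ ".jpg"
      if image_paths.contains expected_path then
        let dataset := if dataset.contains p.1 then dataset else dataset.insert p.1 []
        p.2.foldl (fun d desc => d.modify p.1 [] (fun l => l ++ ["<start> " ++ desc ++ " <end>"])) dataset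
      else dataset)
    PySem.Dict.empty).items

-- ===== PORT B =====
-- pos = {image_id: i for i, image_id in enumerate(description_mapping)}
def pvPos (description_mapping : List (String × List String)) : PySem.Dict String Int :=
  (PySem.List.enumerate (description_mapping.map Prod.fst) 0).foldl
    (fun d t => d.insert t.2 t.1) PySem.Dict.empty

-- the body of B's path loop
def pvStepB (pos : PySem.Dict String Int)
    (st : PySem.Set String × List (Int × String)) (path : String) :
    PySem.Set String × List (Int × String) :=
  if PySem.Str.endswith path ".jpg" then
    let image_id := PySem.Str.slice path none (some (-4))
    match pos.get? image_id with
    | some i =>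
      if decide (image_id ∈ st.1) then st
      else (PySem.Set.add st.1 image_id, st.2 ++ [(i, image_id)])
    | none => st
  else st

def load_description_dataset_alt (description_mapping : List (String × List String)) (image_paths : List String) : List (String × List String) :=
  let pos := pvPos description_mapping
  let sm := image_paths.foldl (pvStepB pos)
    ((PySem.Set.empty : PySem.Set String), ([] : List (Int × String)))
  (PySem.List.sorted sm.2 (fun t => t.1) false).map
    (fun t => (t.2, ((PySem.Dict.ofList description_mapping).getD t.2 []).map
      (fun desc => "<start> " ++ desc ++ " <end>")))

-- ===== PRECONDITION & SPEC =====
-- description_mapping stands for a Python dict, whose keys are necessarily distinct; Pre_ excludes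
-- association lists with duplicate keys, which never arise from a dict argument.
def Pre_load_description_dataset (description_mapping : List (String × List String)) (image_paths : List String) : Prop :=
  (description_mapping.map Prod.fst).Nodup

instance (description_mapping : List (String × List String)) (image_paths : List String) : Decidable (Pre_load_description_dataset description_mapping image_paths) := by unfold Pre_load_description_dataset; infer_instance

def pvWitness_load_description_dataset : (List (String × List String)) × List String :=
  ([("a", ["x", "y"]), ("b", ["z"])], ["a.jpg", "c.png"])

def Spec_load_description_dataset (description_mapping : List (String × List String)) (image_paths : List String) (out : List (String × List String)) : Prop := out = load_description_dataset_alt description_mapping image_paths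
instance (description_mapping : List (String × List String)) (image_paths : List String) (out : List (String × List String)) : Decidable (Spec_load_description_dataset description_mapping image_paths out) := by unfold Spec_load_description_dataset; infer_instance

-- ===== CLAIM (what is proved, stated in full; the proofs are below) =====
def Claim_equal_load_description_dataset : Prop := ∀ (description_mapping : List (String × List String)) (image_paths : List String), Dom_load_description_dataset description_mapping image_paths → Pre_load_description_dataset description_mapping image_paths → Spec_load_description_dataset description_mapping image_paths (load_description_dataset description_mapping image_paths)

-- ===== LEMMAS AND PROOFS =====

-- the wrapped-description map, shared by both characterizations
def pvWrap (v : List String) : List String := v.map (fun desc => "<start> " ++ desc ++ " <end>")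

lemma pv_slice_neg4 (cs : List Char) :
    PySem.List.slice cs none (some (-4)) = cs.take (cs.length - 4) := by
  simp [PySem.List.slice]

lemma pv_toList_slice (p : String) :
    (PySem.Str.slice p none (some (-4))).toList = p.toList.take (p.toList.length - 4) := by
  simp only [PySem.Str.slice, String.toList_ofList, PySem.Chars.slice_eq_listSlice, pv_slice_neg4]

-- a path equals image_id + '.jpg' exactly when it ends in '.jpg' and stripping the last 4 chars gives the id
lemma pv_key_iff (p id : String) :
    (PySem.Str.endswith p ".jpg" = true ∧ PySem.Str.slice p none (some (-4)) = id) ↔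
      p = id ++ ".jpg" := by
  constructor
  · rintro ⟨h1, h2⟩
    rw [PySem.Str.endswith_eq, PySem.Chars.endswith_iff] at h1
    obtain ⟨t, ht⟩ := h1
    have hslice : (PySem.Str.slice p none (some (-4))).toList = t := by
      rw [pv_toList_slice, ← ht]
      simp
    rw [h2] at hslice
    rw [← String.toList_inj, String.toList_append, hslice, ← ht]
  · rintro rfl
    constructor
    · rw [PySem.Str.endswith_eq, PySem.Chars.endswith_iff, String.toList_append]
      exact ⟨id.toList, rfl⟩
    · rw [← String.toList_inj, pv_toList_slice, String.toList_append]
      simp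

-- ===== A-side characterization: A is filter-then-wrap over the mapping =====

-- the inner description loop of A turns the freshly inserted entry into the wrapped list
lemma pv_inner (descs : List String) (id : String) :
    ∀ (d : PySem.Dict String (List String)) (acc : List String),
      descs.foldl (fun d desc => d.modify id [] (fun l => l ++ ["<start> " ++ desc ++ " <end>"])) (d.insert id acc)
        = d.insert id (acc ++ pvWrap descs) := by
  induction descs with
  | nil => intro d acc; simp [pvWrap]
  | cons x xs ih =>
    intro d acc
    have hstep : (d.insert id acc).modify id []
          (fun l => l ++ ["<start> " ++ x ++ " <end>"]) = d.insert id (acc ++ ["<start> " ++ x ++ " <end>"]) := by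
      unfold PySem.Dict.modify
      rw [PySem.Dict.getD_insert_self, PySem.Dict.insert_insert_self]
    simp only [List.foldl_cons, pvWrap, List.map_cons, hstep, ih]
    simp

-- A's loop body as a named step function (definitionally equal to A's lambda)
def pvStepA (image_paths : List String) (dataset : PySem.Dict String (List String))
    (p : String × List String) : PySem.Dict String (List String) :=
  if image_paths.contains (p.1 ++ ".jpg") then
    p.2.foldl (fun d desc => d.modify p.1 [] (fun l => l ++ ["<start> " ++ desc ++ " <end>"]))
      (if dataset.contains p.1 then dataset else dataset.insert p.1 [])
  else dataset

lemma pvStepA_pos (image_paths : List String) (dataset : PySem.Dict String (List String))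
    (p : String × List String) (hc : image_paths.contains (p.1 ++ ".jpg") = true)
    (hcont : dataset.contains p.1 = false) :
    pvStepA image_paths dataset p = dataset.insert p.1 (pvWrap p.2) := by
  unfold pvStepA
  rw [if_pos hc, if_neg (by simp [hcont]), pv_inner]
  simp

lemma pvStepA_neg (image_paths : List String) (dataset : PySem.Dict String (List String))
    (p : String × List String) (hc : image_paths.contains (p.1 ++ ".jpg") = false) :
    pvStepA image_paths dataset p = dataset := by
  unfold pvStepA
  rw [if_neg (by rw [hc]; exact Bool.false_ne_true)]

-- A's outer fold, with generalized accumulator, produces exactly filter-then-wrap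
lemma pv_main (image_paths : List String) :
    ∀ (dm : List (String × List String)) (d : PySem.Dict String (List String)),
      (d.keys ++ dm.map Prod.fst).Nodup →
      (dm.foldl (pvStepA image_paths) d).items
        = d.items ++ (dm.filter (fun p => image_paths.contains (p.1 ++ ".jpg"))).map
            (fun p => (p.1, pvWrap p.2)) := by
  intro dm
  induction dm with
  | nil => intro d _; simp
  | cons a rest ih =>
    intro d hnd
    have hmemk : a.1 ∉ d.keys := by
      rw [List.nodup_append] at hnd
      exact fun hk => hnd.2.2 a.1 hk a.1 (by simp) rfl
    have hcont : d.contains a.1 = false := by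
      cases hc : d.contains a.1 with
      | false => rfl
      | true => exact absurd ((PySem.Dict.contains_iff_mem_keys d a.1).1 hc) hmemk
    rw [List.foldl_cons]
    cases hc : image_paths.contains (a.1 ++ ".jpg") with
    | true =>
      rw [pvStepA_pos image_paths d a hc hcont]
      rw [ih _ (by
        rw [PySem.Dict.keys_insert_of_not_contains d _ hcont]
        simpa [List.append_assoc] using hnd)]
      rw [PySem.Dict.items_insert_of_not_contains d _ hcont,
        List.filter_cons_of_pos (by exact hc), List.map_cons]
      simp
    | false =>
      rw [pvStepA_neg image_paths d a hc]
      rw [ih _ (by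
        refine List.Nodup.sublist ?_ hnd
        exact (List.sublist_cons_self a.1 (rest.map Prod.fst)).append_left d.keys)]
      rw [List.filter_cons_of_neg (by rw [hc]; exact Bool.false_ne_true)]

-- ===== B-side characterization =====

-- the position dict: items are the swapped enumeration of the keys
lemma pvPos_items (dm : List (String × List String)) (hnd : (dm.map Prod.fst).Nodup) :
    (pvPos dm).items = (PySem.List.enumerate (dm.map Prod.fst) 0).map (fun t => (t.2, t.1)) := by
  unfold pvPos
  have := PySem.Dict.items_foldl_insert_fresh (l := PySem.List.enumerate (dm.map Prod.fst) 0)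
    (k := fun t => t.2) (v := fun t => t.1) (d := PySem.Dict.empty)
    (by intro a _; simp) (by rw [show ((PySem.List.enumerate (dm.map Prod.fst) 0).map fun t => t.2) = dm.map Prod.fst from PySem.List.map_snd_enumerate _ _]; exact hnd)
  simpa using this

lemma pvPos_keys_nodup (dm : List (String × List String)) (hnd : (dm.map Prod.fst).Nodup) :
    (pvPos dm).keys.Nodup := by
  have : (pvPos dm).keys = dm.map Prod.fst := by
    show (pvPos dm).items.map Prod.fst = _
    rw [pvPos_items dm hnd, List.map_map]
    exact PySem.List.map_snd_enumerate _ _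
  rw [this]; exact hnd

lemma pvPos_get? (dm : List (String × List String)) (hnd : (dm.map Prod.fst).Nodup)
    (id : String) (i : Int) :
    (pvPos dm).get? id = some i ↔ (i, id) ∈ PySem.List.enumerate (dm.map Prod.fst) 0 := by
  rw [PySem.Dict.get?_eq_some_iff_mem_items _ _ _ (pvPos_keys_nodup dm hnd), pvPos_items dm hnd]
  constructor
  · intro h
    obtain ⟨t, ht, he⟩ := List.mem_map.1 h
    obtain ⟨h1, h2⟩ := Prod.mk.injEq .. ▸ he
    cases t
    simp_all
  · intro h
    exact List.mem_map.2 ⟨(i, id), h, rfl⟩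

-- two strings with the same '.jpg' suffix appended are equal
lemma pv_append_cancel (a b : String) (h : a ++ ".jpg" = b ++ ".jpg") : a = b := by
  have h1 := congrArg String.toList h
  simp only [String.toList_append] at h1
  exact String.toList_inj.mp (List.append_cancel_right h1)

-- the path loop: seen tracks the ids in matched; membership in the result
lemma pv_loop (pos : PySem.Dict String Int) (paths : List String) :
    ∀ (s : PySem.Set String) (m : List (Int × String)),
      (∀ id, id ∈ s ↔ id ∈ m.map Prod.snd) →
      (∀ id, id ∈ (paths.foldl (pvStepB pos) (s, m)).1 ↔ id ∈ (paths.foldl (pvStepB pos) (s, m)).2.map Prod.snd) ∧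
      (∀ t, t ∈ (paths.foldl (pvStepB pos) (s, m)).2 ↔
        t ∈ m ∨ (pos.get? t.2 = some t.1 ∧ t.2 ∉ s ∧ (t.2 ++ ".jpg") ∈ paths)) ∧
      ((m.map Prod.snd).Nodup → ((paths.foldl (pvStepB pos) (s, m)).2.map Prod.snd).Nodup) := by
  induction paths with
  | nil =>
    intro s m hinv
    refine ⟨hinv, fun t => by simp, fun h => h⟩
  | cons p ps ih =>
    intro s m hinv
    by_cases hend : PySem.Str.endswith p ".jpg" = true
    · set id0 := PySem.Str.slice p none (some (-4)) with hid0
      have hp : p = id0 ++ ".jpg" := (pv_key_iff p id0).1 ⟨hend, rfl⟩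
      cases hget : pos.get? id0 with
      | none =>
        have hstep : pvStepB pos (s, m) p = (s, m) := by
          unfold pvStepB; rw [if_pos hend]; simp only [← hid0, hget]
        rw [List.foldl_cons, hstep]
        obtain ⟨i1, i2, i3⟩ := ih s m hinv
        refine ⟨i1, fun t => ?_, i3⟩
        rw [i2 t]
        constructor
        · rintro (h | ⟨h1, h2, h3⟩)
          · exact Or.inl h
          · exact Or.inr ⟨h1, h2, List.mem_cons_of_mem _ h3⟩
        · rintro (h | ⟨h1, h2, h3⟩)
          · exact Or.inl h
          · rcases List.mem_cons.1 h3 with he | hm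
            · exfalso
              have h2' : t.2 = id0 := pv_append_cancel _ _ (hp ▸ he)
              rw [h2', hget] at h1
              simp at h1
            · exact Or.inr ⟨h1, h2, hm⟩
      | some i =>
        by_cases hs : id0 ∈ s
        · have hstep : pvStepB pos (s, m) p = (s, m) := by
            unfold pvStepB; rw [if_pos hend]; simp only [← hid0, hget]
            rw [if_pos (by exact decide_eq_true hs)]
          rw [List.foldl_cons, hstep]
          obtain ⟨i1, i2, i3⟩ := ih s m hinv
          refine ⟨i1, fun t => ?_, i3⟩
          rw [i2 t]
          constructor
          · rintro (h | ⟨h1, h2, h3⟩)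
            · exact Or.inl h
            · exact Or.inr ⟨h1, h2, List.mem_cons_of_mem _ h3⟩
          · rintro (h | ⟨h1, h2, h3⟩)
            · exact Or.inl h
            · rcases List.mem_cons.1 h3 with he | hm
              · exfalso
                have h2' : t.2 = id0 := pv_append_cancel _ _ (hp ▸ he)
                exact h2 (h2' ▸ hs)
              · exact Or.inr ⟨h1, h2, hm⟩
        · have hstep : pvStepB pos (s, m) p = (PySem.Set.add s id0, m ++ [(i, id0)]) := by
            unfold pvStepB; rw [if_pos hend]; simp only [← hid0, hget]
            rw [if_neg (by simp [hs])]
          rw [List.foldl_cons, hstep]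
          have hinv' : ∀ id, id ∈ PySem.Set.add s id0 ↔ id ∈ (m ++ [(i, id0)]).map Prod.snd := by
            intro id
            rw [PySem.Set.mem_add]
            simp only [List.map_append, List.mem_append, List.map_cons, List.map_nil,
              List.mem_singleton]
            constructor
            · rintro (h | h)
              · exact Or.inl ((hinv id).1 h)
              · exact Or.inr (by simp [h])
            · rintro (h | h)
              · exact Or.inl ((hinv id).2 h)
              · exact Or.inr (by simpa using h)
          obtain ⟨i1, i2, i3⟩ := ih (PySem.Set.add s id0) (m ++ [(i, id0)]) hinv'
          have hid0m : id0 ∉ m.map Prod.snd := fun h => hs ((hinv id0).2 h)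
          refine ⟨i1, fun t => ?_, fun hm => i3 (by
            simp only [List.map_append, List.map_cons, List.map_nil]
            rw [List.nodup_append]
            exact ⟨hm, List.nodup_singleton _, by
              intro a ha b hb
              rw [List.mem_singleton] at hb
              subst hb
              exact fun he => hid0m (he ▸ ha)⟩)⟩
          rw [i2 t]
          constructor
          · rintro (h | ⟨h1, h2, h3⟩)
            · rcases List.mem_append.1 h with h | h
              · exact Or.inl h
              · rw [List.mem_singleton] at h
                subst h
                exact Or.inr ⟨hget, hs, by rw [← hp]; exact List.mem_cons_self ..⟩
            · exact Or.inr ⟨h1, fun hin => h2 ((PySem.Set.mem_add _ _ _).2 (Or.inl hin)),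
                List.mem_cons_of_mem _ h3⟩

          · rintro (h | ⟨h1, h2, h3⟩)
            · exact Or.inl (List.mem_append_left _ h)
            · by_cases ht : t = (i, id0)
              · exact Or.inl (List.mem_append_right _ (by simp [ht]))
              · rcases List.mem_cons.1 h3 with he | hm
                · exfalso
                  have h2' : t.2 = id0 := pv_append_cancel _ _ (hp ▸ he)
                  have h1' : t.1 = i := by
                    rw [h2', hget] at h1
                    exact (Option.some.inj h1).symm
                  exact ht (Prod.ext h1' h2')
                · refine Or.inr ⟨h1, ?_, hm⟩
                  rw [PySem.Set.mem_add]
                  rintro (hin | he)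
                  · exact h2 hin
                  · have h1' : t.1 = i := by
                      rw [he, hget] at h1
                      exact (Option.some.inj h1).symm
                    exact ht (Prod.ext h1' he)
    · have hstep : pvStepB pos (s, m) p = (s, m) := by
        unfold pvStepB
        rw [if_neg hend]
      rw [List.foldl_cons, hstep]
      obtain ⟨i1, i2, i3⟩ := ih s m hinv
      refine ⟨i1, fun t => ?_, i3⟩
      rw [i2 t]
      constructor
      · rintro (h | ⟨h1, h2, h3⟩)
        · exact Or.inl h
        · exact Or.inr ⟨h1, h2, List.mem_cons_of_mem _ h3⟩
      · rintro (h | ⟨h1, h2, h3⟩)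
        · exact Or.inl h
        · rcases List.mem_cons.1 h3 with he | hm
          · exact absurd ((pv_key_iff p t.2).2 he.symm).1 hend
          · exact Or.inr ⟨h1, h2, hm⟩

-- the sorted matched list is exactly the filtered enumeration of the keys
def pvM (dm : List (String × List String)) (paths : List String) : List (Int × String) :=
  (PySem.List.enumerate (dm.map Prod.fst) 0).filter (fun t => paths.contains (t.2 ++ ".jpg"))

lemma pv_sorted_eq (dm : List (String × List String)) (paths : List String)
    (hnd : (dm.map Prod.fst).Nodup) :
    PySem.List.sorted (paths.foldl (pvStepB (pvPos dm)) ((PySem.Set.empty : PySem.Set String), ([] : List (Int × String)))).2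
      (fun t => t.1) false = pvM dm paths := by
  obtain ⟨_, hmem, hnod⟩ := pv_loop (pvPos dm) paths PySem.Set.empty [] (by simp [PySem.Set.empty])
  set m := (paths.foldl (pvStepB (pvPos dm)) ((PySem.Set.empty : PySem.Set String), ([] : List (Int × String)))).2 with hm
  have hsnd : ((PySem.List.enumerate (dm.map Prod.fst) 0).map Prod.snd).Nodup := by
    rw [PySem.List.map_snd_enumerate]
    exact hnd
  have hMnodup : (pvM dm paths).Nodup :=
    List.Nodup.of_map Prod.snd
      (List.Nodup.sublist (List.Sublist.map Prod.snd List.filter_sublist) hsnd)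
  have hmnodup : m.Nodup := List.Nodup.of_map Prod.snd (hnod (by simp))
  have hiff : ∀ t, t ∈ pvM dm paths ↔ t ∈ m := by
    intro t
    rw [hmem t]
    unfold pvM
    rw [List.mem_filter]
    constructor
    · rintro ⟨h1, h2⟩
      refine Or.inr ⟨(pvPos_get? dm hnd t.2 t.1).2 (by cases t; exact h1), by simp [PySem.Set.empty], ?_⟩
      simpa [List.contains_iff_mem] using h2
    · rintro (h | ⟨h1, _, h3⟩)
      · exact absurd h (List.not_mem_nil)
      · refine ⟨by have := (pvPos_get? dm hnd t.2 t.1).1 h1; cases t; exact this, ?_⟩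
        simpa [List.contains_iff_mem] using h3
  have hperm : (pvM dm paths).Perm m :=
    (List.perm_ext_iff_of_nodup hMnodup hmnodup).mpr hiff
  have hpair : (pvM dm paths).Pairwise (fun a b => a.1 < b.1) :=
    List.Pairwise.sublist List.filter_sublist (PySem.List.pairwise_lt_enumerate _ _)
  exact PySem.List.sorted_eq_of_perm_of_pairwise_lt _ _ _ hperm hpair

-- lookup in the dict built from a Nodup association list returns the listed value
lemma pv_ofList_getD (dm : List (String × List String)) (hnd : (dm.map Prod.fst).Nodup) :
    ∀ p ∈ dm, (PySem.Dict.ofList dm).getD p.1 [] = p.2 := by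
  have hitems : (PySem.Dict.ofList dm).items = dm := by
    have := PySem.Dict.items_foldl_insert_fresh (l := dm) (k := Prod.fst) (v := Prod.snd)
      (d := PySem.Dict.empty) (by intro a _; simp) hnd
    simpa using this
  have hkeys : (PySem.Dict.ofList dm).keys.Nodup := by
    simp only [PySem.Dict.keys]
    rw [hitems]
    exact hnd
  intro p hp
  exact PySem.Dict.getD_of_mem_items _ (by rw [hitems]; cases p; exact hp) hkeys []

-- mapping the filtered enumeration through the lookup is filter-then-wrap over the mapping
lemma pv_emit' (paths : List String) (G : String → List String) :
    ∀ (dm' : List (String × List String)) (s : Int), (∀ p ∈ dm', G p.1 = pvWrap p.2) →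
      (((PySem.List.enumerate (dm'.map Prod.fst) s).filter (fun t => paths.contains (t.2 ++ ".jpg"))).map
        (fun t => (t.2, G t.2)))
      = (dm'.filter (fun p => paths.contains (p.1 ++ ".jpg"))).map (fun p => (p.1, pvWrap p.2)) := by
  intro dm'
  induction dm' with
  | nil => intro s _; simp [PySem.List.enumerate_nil]
  | cons a rest ih =>
    intro s hG
    rw [List.map_cons, PySem.List.enumerate_cons]
    cases hc : paths.contains (a.1 ++ ".jpg") with
    | true =>
      rw [List.filter_cons_of_pos (by exact hc), List.filter_cons_of_pos (by exact hc)]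
      rw [List.map_cons, List.map_cons]
      rw [ih (s + 1) (fun p hp => hG p (List.mem_cons_of_mem _ hp))]
      rw [hG a (List.mem_cons_self ..)]
    | false =>
      rw [List.filter_cons_of_neg (by rw [hc]; exact Bool.false_ne_true),
        List.filter_cons_of_neg (by rw [hc]; exact Bool.false_ne_true)]
      exact ih (s + 1) (fun p hp => hG p (List.mem_cons_of_mem _ hp))

-- ===== VERDICT (by name: the statement is the Claim_ definition above) =====
theorem load_description_dataset_spec : Claim_equal_load_description_dataset := by
  intro dm paths _ hpre
  unfold Spec_load_description_dataset
  have hA : load_description_dataset dm paths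
      = (dm.filter (fun p => paths.contains (p.1 ++ ".jpg"))).map (fun p => (p.1, pvWrap p.2)) := by
    have hnd : ((PySem.Dict.empty : PySem.Dict String (List String)).keys ++ dm.map Prod.fst).Nodup := by
      simpa using hpre
    simpa using pv_main paths dm PySem.Dict.empty hnd
  have hB : load_description_dataset_alt dm paths
      = (dm.filter (fun p => paths.contains (p.1 ++ ".jpg"))).map (fun p => (p.1, pvWrap p.2)) := by
    show (PySem.List.sorted (paths.foldl (pvStepB (pvPos dm)) ((PySem.Set.empty : PySem.Set String), ([] : List (Int × String)))).2 (fun t => t.1) false).map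
        (fun t => (t.2, ((PySem.Dict.ofList dm).getD t.2 []).map (fun desc => "<start> " ++ desc ++ " <end>"))) = _
    rw [pv_sorted_eq dm paths hpre]
    unfold pvM
    exact pv_emit' paths
      (fun id => ((PySem.Dict.ofList dm).getD id []).map (fun desc => "<start> " ++ desc ++ " <end>"))
      dm 0 (fun p hp => by simp only []; rw [pv_ofList_getD dm hpre p hp]; rfl)
  rw [hA, hB]
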